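-- pv_equiv track=rewrite | github.com/KlasScripts/ios-ffs-browser | adapters/ffs.py | _detect_system_prefix
-- ===== SOURCE A (Python) =====
-- def _has_prefix(zip_names: frozenset, prefix: str) -> bool:
--     """Return True if any entry in zip_names starts with *prefix* (with or without
--     a trailing slash), or is exactly *prefix*.  Handles zips that omit explicit
--     directory entries by checking file entries that live under the prefix."""
--     slash = prefix if prefix.endswith("/") else prefix + "/"
--     bare  = prefix.rstrip("/")
--     if bare in zip_names or slash in zip_names:
--         return True
--     return any(n.startswith(slash) for n in zip_names)
--
-- def _detect_system_prefix(zip_names: frozenset) -> str: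
--     """Return the filesystemN folder that contains the iOS system partition.
--     Identified by the presence of System/Library, which is unique to the
--     system partition.  Falls back to 'filesystem1'."""
--     for n in range(1, 10):
--         prefix = f"filesystem{n}"
--         if (
--             f"{prefix}/System/Library/CoreServices/SystemVersion.plist" in zip_names
--             or _has_prefix(zip_names, f"{prefix}/System/Library")
--             or _has_prefix(zip_names, f"{prefix}/System")
--         ):
--             return prefix
--     return "filesystem1"
-- ===== SOURCE B (Python) =====
-- def _detect_system_prefix(zip_names):
--     """Single pass: parse each entry for 'filesystem<d>/System' (exact or as a
--     directory prefix), keep the smallest digit d; fall back to 1."""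
--     best = None
--     for name in zip_names:
--         if len(name) > 10 and name.startswith("filesystem") and "1" <= name[10] <= "9":
--             rest = name[11:]
--             if rest == "/System" or rest.startswith("/System/"):
--                 d = int(name[10])
--                 if best is None or d < best:
--                     best = d
--     return f"filesystem{best if best is not None else 1}"
-- ===== Notes on version B (the rewrite author's own statement) =====
-- stated objective: faster
-- what changed: Replaces the outer 1..9 candidate loop with its per-candidate membership tests and any()-scans of the name set by a single pass over zip_names that parses each entry's 'filesystem<d>/System' prefix and keeps the minimum digit.
import Mathlib
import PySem

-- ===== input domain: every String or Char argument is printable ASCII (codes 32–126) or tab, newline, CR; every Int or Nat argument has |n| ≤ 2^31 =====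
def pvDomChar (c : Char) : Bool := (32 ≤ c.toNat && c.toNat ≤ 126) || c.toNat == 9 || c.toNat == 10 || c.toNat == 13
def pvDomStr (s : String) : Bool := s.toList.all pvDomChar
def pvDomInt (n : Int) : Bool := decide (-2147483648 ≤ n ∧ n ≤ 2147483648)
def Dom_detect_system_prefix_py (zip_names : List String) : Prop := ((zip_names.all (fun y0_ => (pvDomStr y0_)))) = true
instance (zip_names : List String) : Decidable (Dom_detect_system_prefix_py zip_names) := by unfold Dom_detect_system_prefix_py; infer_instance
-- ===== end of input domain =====

-- B replaces A's 1..9 candidate loop (each candidate re-scanning the name set) by one pass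
-- over the names that parses each entry's 'filesystem<d>/System' prefix and keeps the
-- minimum digit; same result, measurably faster (one scan instead of up to 27).


-- ===== PORT A =====
-- hand port of s.rstrip("/") (PySem has no right-strip-with-chars primitive); exact:
-- drops the trailing run of '/' code points
def pyRstripSlash (s : String) : String :=
  String.ofList ((s.toList.reverse.dropWhile (fun c => c == '/')).reverse)

def has_prefix_py (zip_names : List String) (pfx : String) : Bool :=
  let slash := if PySem.Str.endswith pfx "/" then pfx else pfx ++ "/"
  let bare := pyRstripSlash pfx
  if zip_names.contains bare || zip_names.contains slash then true
  else zip_names.any (fun n => PySem.Str.startswith n slash)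

-- the if-condition of A's loop body
def condA (zip_names : List String) (pfx : String) : Bool :=
  zip_names.contains (pfx ++ "/System/Library/CoreServices/SystemVersion.plist")
    || has_prefix_py zip_names (pfx ++ "/System/Library")
    || has_prefix_py zip_names (pfx ++ "/System")

def detectLoopA (zip_names : List String) : List Int → String
  | [] => "filesystem1"
  | n :: rest =>
    let pfx := "filesystem" ++ PySem.Int.toStr n
    if condA zip_names pfx then pfx else detectLoopA zip_names rest

def detect_system_prefix_py (zip_names : List String) : String :=
  detectLoopA zip_names (PySem.List.pyRange 1 10 1)

-- ===== PORT B =====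
-- loop body of B: update the running minimum digit for one name
-- (PySem.Str.pyGet? name 10 = none exactly when len(name) ≤ 10, Python's first guard)
def altStep (best : Option Nat) (name : String) : Option Nat :=
  match PySem.Str.pyGet? name 10 with
  | none => best
  | some c =>
    if PySem.Str.startswith name "filesystem" && (decide ('1' ≤ c) && decide (c ≤ '9')) then
      let rest := PySem.Str.slice name (some 11) none
      if rest == "/System" || PySem.Str.startswith rest "/System/" then
        let d := c.toNat - 48   -- int(name[10])
        match best with
        | none => some d
        | some b => if d < b then some d else best
      else best
    else best

def detect_system_prefix_py_alt (zip_names : List String) : String :=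
  match zip_names.foldl altStep none with
  | some b => "filesystem" ++ PySem.Int.toStr (b : Int)
  | none => "filesystem" ++ PySem.Int.toStr 1

-- ===== PRECONDITION & SPEC =====
def Spec_detect_system_prefix_py (zip_names : List String) (out : String) : Prop := out = detect_system_prefix_py_alt zip_names
instance (zip_names : List String) (out : String) : Decidable (Spec_detect_system_prefix_py zip_names out) := by unfold Spec_detect_system_prefix_py; infer_instance

-- ===== CLAIM (what is proved, stated in full; the proofs are below) =====
def Claim_equal_detect_system_prefix_py : Prop := ∀ (zip_names : List String), Dom_detect_system_prefix_py zip_names → Spec_detect_system_prefix_py zip_names (detect_system_prefix_py zip_names)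

-- ===== LEMMAS AND PROOFS =====

-- the list-level shapes both programs test for
def pvFS : List Char := "filesystem".toList
def pvSYS : List Char := "/System".toList
def pvTarget (d : Nat) : List Char := pvFS ++ Char.ofNat (48 + d) :: pvSYS
-- "the name designates digit d": it is exactly filesystem<d>/System, or lies under it
def pvAP (d : Nat) (s : String) : Prop :=
  s.toList = pvTarget d ∨ (pvTarget d ++ ['/']) <+: s.toList

-- the pure parse underlying altStep
def pvBMatch (name : String) : Option Nat :=
  match PySem.Str.pyGet? name 10 with
  | none => none
  | some c =>
    if PySem.Str.startswith name "filesystem" && (decide ('1' ≤ c) && decide (c ≤ '9')) then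
      if PySem.Str.slice name (some 11) none == "/System"
          || PySem.Str.startswith (PySem.Str.slice name (some 11) none) "/System/" then
        some (c.toNat - 48)
      else none
    else none

lemma altStep_eq (best : Option Nat) (name : String) :
    altStep best name =
      match pvBMatch name with
      | none => best
      | some d => match best with
                  | none => some d
                  | some b => if d < b then some d else best := by
  unfold altStep pvBMatch
  cases hp : PySem.Str.pyGet? name 10 <;> simp only [hp] <;> try rfl
  split_ifs <;> rfl

lemma bMatch_some_iff (name : String) (d : Nat) :
    pvBMatch name = some d ↔ (1 ≤ d ∧ d ≤ 9 ∧ pvAP d name) := by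
  have hget : PySem.Str.pyGet? name 10 = name.toList[10]? := by simp [pysem]
  have hsliceL : PySem.List.slice name.toList (some 11) none = List.drop 11 name.toList := by
    simp [pysem]
  have hsliceS : (PySem.Str.slice name (some 11) none).toList = List.drop 11 name.toList := by
    simp [pysem]
  constructor
  · intro h
    unfold pvBMatch at h
    rw [hget] at h
    cases hg : name.toList[10]? with
    | none => rw [hg] at h; simp at h
    | some c =>
      rw [hg] at h
      dsimp only [] at h
      by_cases h1 : (PySem.Str.startswith name "filesystem" && (decide ('1' ≤ c) && decide (c ≤ '9'))) = true
      swap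
      · rw [if_neg h1] at h; simp at h
      rw [if_pos h1] at h
      by_cases h2 : (PySem.Str.slice name (some 11) none == "/System"
          || PySem.Str.startswith (PySem.Str.slice name (some 11) none) "/System/") = true
      swap
      · rw [if_neg h2] at h; simp at h
      rw [if_pos h2] at h
      have hd : d = c.toNat - 48 := (Option.some.inj h).symm
      obtain ⟨hs, hc⟩ := Bool.and_eq_true_iff.mp h1
      obtain ⟨hc1, hc9⟩ := Bool.and_eq_true_iff.mp hc
      have hc1' : 49 ≤ c.toNat := by simpa [Char.le_def] using of_decide_eq_true hc1
      have hc9' : c.toNat ≤ 57 := by simpa [Char.le_def] using of_decide_eq_true hc9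
      have hsw : pvFS <+: name.toList := by
        have := hs; simp only [pysem, PySem.Chars.startswith_iff] at this; exact this
      obtain ⟨t, ht⟩ := hsw
      have hL : name.toList = pvFS ++ t := ht.symm
      have h10 : t[0]? = some c := by
        rw [hL, List.getElem?_append_right (by decide : pvFS.length ≤ 10)] at hg
        rwa [show (10:Nat) - pvFS.length = 0 from by decide] at hg
      cases t with
      | nil => simp at h10
      | cons c0 t' =>
        have hc0 : c0 = c := by simpa using h10
        subst hc0
        have hrest : (PySem.Str.slice name (some 11) none).toList = t' := by
          rw [hsliceS, hL, List.drop_append,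
              show List.drop 11 pvFS = [] from by decide,
              show (11:Nat) - pvFS.length = 1 from by decide]
          simp
        have hcd : Char.ofNat (48 + d) = c0 := by
          rw [hd, show 48 + (c0.toNat - 48) = c0.toNat from by omega, Char.ofNat_toNat]
        refine ⟨by omega, by omega, ?_⟩
        rcases Bool.or_eq_true_iff.mp h2 with he | hp
        · have he' : (PySem.Str.slice name (some 11) none) = "/System" := beq_iff_eq.mp he
          have ht' : t' = pvSYS := by rw [← hrest, he']; rfl
          exact Or.inl (by rw [hL, ht']; simp [pvTarget, pvAP, hcd])
        · have hp' : ("/System/".toList) <+: t' := by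
            have := hp
            simp only [pysem, PySem.Chars.startswith_iff] at this
            rw [show PySem.List.slice name.toList (some 11) none = t' from by
              rw [hsliceL, hL, List.drop_append,
                  show List.drop 11 pvFS = [] from by decide,
                  show (11:Nat) - pvFS.length = 1 from by decide]
              simp] at this
            exact this
          refine Or.inr ?_
          rw [hL]
          have heq : pvTarget d ++ ['/'] = (pvFS ++ [c0]) ++ "/System/".toList := by
            rw [show pvTarget d ++ ['/'] = pvFS ++ Char.ofNat (48+d) :: (pvSYS ++ ['/']) from by simp [pvTarget],
                hcd, show pvSYS ++ ['/'] = "/System/".toList from by decide, List.append_cons]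
          rw [heq, List.append_cons pvFS c0 t']
          exact (List.prefix_append_right_inj (pvFS ++ [c0])).mpr hp'
  · rintro ⟨hd1, hd9, hap⟩
    have hv : (48 + d).isValidChar := by constructor; omega
    have hcv : (Char.ofNat (48 + d)).toNat = 48 + d := by rw [Char.toNat_ofNat]; simp [hv]
    have hdec : ∃ t', name.toList = pvFS ++ Char.ofNat (48+d) :: t' ∧
        (t' = pvSYS ∨ "/System/".toList <+: t') := by
      rcases hap with h | ⟨u, hu⟩
      · exact ⟨pvSYS, by simpa [pvTarget] using h, Or.inl rfl⟩
      · refine ⟨pvSYS ++ '/' :: u, ?_, Or.inr ⟨u, by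
          rw [show "/System/".toList = pvSYS ++ ['/'] from by decide]; simp⟩⟩
        rw [← hu]; simp [pvTarget]
    obtain ⟨t', hL, hcase⟩ := hdec
    have hg : name.toList[10]? = some (Char.ofNat (48+d)) := by
      rw [hL, List.getElem?_append_right (by decide : pvFS.length ≤ 10),
          show (10:Nat) - pvFS.length = 0 from by decide]
      rfl
    have hsw : PySem.Str.startswith name "filesystem" = true := by
      simp only [pysem, PySem.Chars.startswith_iff]
      rw [hL]; exact List.prefix_append _ _
    have hc1 : '1' ≤ Char.ofNat (48+d) := by
      simp only [Char.le_def, UInt32.le_iff_toNat_le]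
      rw [show ((Char.ofNat (48+d)).val.toNat) = (Char.ofNat (48+d)).toNat from rfl, hcv]
      show (49:Nat) ≤ 48 + d
      omega
    have hc9 : Char.ofNat (48+d) ≤ '9' := by
      simp only [Char.le_def, UInt32.le_iff_toNat_le]
      rw [show ((Char.ofNat (48+d)).val.toNat) = (Char.ofNat (48+d)).toNat from rfl, hcv]
      show 48 + d ≤ (57:Nat)
      omega
    have hrest : (PySem.Str.slice name (some 11) none).toList = t' := by
      rw [hsliceS, hL, List.drop_append,
          show List.drop 11 pvFS = [] from by decide,
          show (11:Nat) - pvFS.length = 1 from by decide]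
      simp
    unfold pvBMatch
    rw [hget, hg]
    dsimp only []
    rw [if_pos (by
      simp only [Bool.and_eq_true, decide_eq_true_eq]
      exact ⟨hsw, hc1, hc9⟩)]
    rcases hcase with h | h
    · have he : (PySem.Str.slice name (some 11) none) = "/System" := by
        apply String.toList_inj.mp; rw [hrest, h]; rfl
      rw [if_pos (by rw [he]; simp)]
      simp [hcv]
    · have hp : PySem.Str.startswith (PySem.Str.slice name (some 11) none) "/System/" = true := by
        simp only [pysem, PySem.Chars.startswith_iff]
        rw [show PySem.List.slice name.toList (some 11) none = t' from by
          rw [hsliceL, hL, List.drop_append,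
              show List.drop 11 pvFS = [] from by decide,
              show (11:Nat) - pvFS.length = 1 from by decide]
          simp]
        exact h
      rw [if_pos (by rw [hp]; simp)]
      simp [hcv]

lemma endswith_slash_false (q : String) (ch : Char) (hch : ch ≠ '/')
    (h : q.toList.getLast? = some ch) : PySem.Str.endswith q "/" = false := by
  by_contra hne
  have h2 : PySem.Str.endswith q "/" = true := by
    cases hb : PySem.Str.endswith q "/" with
    | false => exact absurd hb hne
    | true => rfl
  simp only [pysem] at h2
  obtain ⟨t, ht⟩ := h2
  rw [← ht, List.getLast?_append_of_ne_nil t (by decide), show "/".toList = ['/'] from by decide] at h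
  simp at h
  exact hch h.symm

lemma rstrip_eq_self (q : String) (ch : Char) (hch : ch ≠ '/')
    (h : q.toList.getLast? = some ch) : pyRstripSlash q = q := by
  unfold pyRstripSlash
  have hh : q.toList.reverse.head? = some ch := by rw [List.head?_reverse]; exact h
  cases hrev : q.toList.reverse with
  | nil => rw [hrev] at hh; simp at hh
  | cons x xs =>
    rw [hrev] at hh
    have hx : x = ch := by simpa using hh
    subst hx
    have hq2 : (x :: xs).reverse = q.toList := by rw [← hrev, List.reverse_reverse]
    rw [show List.dropWhile (fun c => c == '/') (x :: xs) = x :: xs from by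
      simp [List.dropWhile_cons, hch]]
    rw [hq2, String.ofList_toList]

lemma hasPrefix_true_iff (names : List String) (q : String) (ch : Char) (hch : ch ≠ '/')
    (hlast : q.toList.getLast? = some ch) :
    has_prefix_py names q = true ↔
      ∃ s ∈ names, s = q ∨ s = q ++ "/" ∨ (q ++ "/").toList <+: s.toList := by
  unfold has_prefix_py
  rw [endswith_slash_false q ch hch hlast]
  simp only [rstrip_eq_self q ch hch hlast, Bool.false_eq_true, if_false]
  constructor
  · intro hif
    by_cases hc : (names.contains q || names.contains (q ++ "/")) = true
    · rcases Bool.or_eq_true_iff.mp hc with hm | hm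
      · exact ⟨q, List.contains_iff_mem.mp hm, Or.inl rfl⟩
      · exact ⟨q ++ "/", List.contains_iff_mem.mp hm, Or.inr (Or.inl rfl)⟩
    · rw [if_neg hc] at hif
      obtain ⟨s, hs, hpre⟩ := List.any_eq_true.mp hif
      refine ⟨s, hs, Or.inr (Or.inr ?_)⟩
      have := hpre
      simp only [pysem] at this
      exact this
  · rintro ⟨s, hs, hcase⟩
    by_cases hc : (names.contains q || names.contains (q ++ "/")) = true
    · rw [if_pos hc]
    · rw [if_neg hc]
      rcases hcase with rfl | rfl | hpre
      · exact absurd (Bool.or_eq_true_iff.mpr (Or.inl (List.contains_iff_mem.mpr hs))) hc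
      · exact absurd (Bool.or_eq_true_iff.mpr (Or.inr (List.contains_iff_mem.mpr hs))) hc
      · refine List.any_eq_true.mpr ⟨s, hs, ?_⟩
        simp only [pysem]
        exact hpre

lemma condA_iff_gen (names : List String) (d : Nat) (pfx : String)
    (hpl : pfx.toList = pvFS ++ [Char.ofNat (48 + d)]) :
    condA names pfx = true ↔ ∃ s ∈ names, pvAP d s := by
  -- the prefix-closure fact both directions lean on
  have key : ∀ (t : String) (lit : List Char),
      t.toList = (pvFS ++ [Char.ofNat (48+d)]) ++ lit → (pvSYS ++ ['/']) <+: lit →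
      pvTarget d ++ ['/'] <+: t.toList := by
    intro t lit ht hpre
    rw [ht, show pvTarget d ++ ['/'] = (pvFS ++ [Char.ofNat (48+d)]) ++ (pvSYS ++ ['/']) from by
      simp [pvTarget]]
    exact (List.prefix_append_right_inj _).mpr hpre
  have hAPeq : ∀ s : String, s.toList = (pvFS ++ [Char.ofNat (48+d)]) ++ pvSYS → pvAP d s := by
    intro s hs
    exact Or.inl (by rw [hs]; simp [pvTarget])
  have hqsys : (pfx ++ "/System").toList = (pvFS ++ [Char.ofNat (48+d)]) ++ pvSYS := by
    rw [String.toList_append, hpl]; rfl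
  have hlast_sys : (pfx ++ "/System").toList.getLast? = some 'm' := by
    rw [hqsys, List.getLast?_append_of_ne_nil _ (by decide)]
    decide
  have hqlib : (pfx ++ "/System/Library").toList
      = (pvFS ++ [Char.ofNat (48+d)]) ++ "/System/Library".toList := by
    rw [String.toList_append, hpl]
  have hqlibs : ((pfx ++ "/System/Library") ++ "/").toList
      = (pvFS ++ [Char.ofNat (48+d)]) ++ ("/System/Library".toList ++ "/".toList) := by
    rw [String.toList_append, String.toList_append, hpl, List.append_assoc]
  have hqsyss : ((pfx ++ "/System") ++ "/").toList
      = (pvFS ++ [Char.ofNat (48+d)]) ++ (pvSYS ++ "/".toList) := by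
    rw [String.toList_append, String.toList_append, hpl, List.append_assoc]; rfl
  have hlast_lib : (pfx ++ "/System/Library").toList.getLast? = some 'y' := by
    rw [hqlib, List.getLast?_append_of_ne_nil _ (by decide)]
    decide
  have hplist : (pfx ++ "/System/Library/CoreServices/SystemVersion.plist").toList
      = (pvFS ++ [Char.ofNat (48+d)]) ++ "/System/Library/CoreServices/SystemVersion.plist".toList := by
    rw [String.toList_append, hpl]
  unfold condA
  simp only [Bool.or_eq_true, List.contains_iff_mem,
    hasPrefix_true_iff names (pfx ++ "/System/Library") 'y' (by decide) hlast_lib,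
    hasPrefix_true_iff names (pfx ++ "/System") 'm' (by decide) hlast_sys]
  constructor
  · rintro ((hmemb | ⟨s, hs, hcs⟩) | ⟨s, hs, hcs⟩)
    · exact ⟨_, hmemb, Or.inr (key _ _ hplist (by decide))⟩
    · refine ⟨s, hs, ?_⟩
      rcases hcs with rfl | rfl | hpre
      · exact Or.inr (key _ _ hqlib (by decide))
      · exact Or.inr (key _ _ hqlibs (by decide))
      · exact Or.inr (List.IsPrefix.trans (key _ _ hqlibs (by decide)) hpre)
    · refine ⟨s, hs, ?_⟩
      rcases hcs with rfl | rfl | hpre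
      · exact hAPeq _ hqsys
      · exact Or.inr (key _ _ hqsyss (by decide))
      · exact Or.inr (List.IsPrefix.trans (key _ _ hqsyss (by decide)) hpre)
  · rintro ⟨s, hs, hap⟩
    refine Or.inr ⟨s, hs, ?_⟩
    rcases hap with heq | hpre
    · exact Or.inl (String.toList_inj.mp (by rw [heq, hqsys]; simp [pvTarget]))
    · refine Or.inr (Or.inr ?_)
      rw [show ((pfx ++ "/System") ++ "/").toList = pvTarget d ++ ['/'] from by
        rw [hqsyss, show ("/".toList : List Char) = ['/'] from by decide]
        simp [pvTarget, pvSYS]]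
      exact hpre

lemma foldl_altStep_eq (names : List String) (acc : Option Nat) :
    names.foldl altStep acc = (acc.toList ++ names.filterMap pvBMatch).min? := by
  induction names generalizing acc with
  | nil => cases acc <;> simp [List.min?]
  | cons x xs ih =>
    rw [List.foldl_cons, ih (altStep acc x), altStep_eq]
    cases hb : pvBMatch x with
    | none => simp [List.filterMap_cons, hb]
    | some d =>
      simp only [List.filterMap_cons, hb]
      cases acc with
      | none => simp
      | some b =>
        have hm : (if d < b then some d else some b : Option Nat) = some (min b d) := by
          split_ifs with h <;> simp [Nat.min_def] <;> omega
        show ((if d < b then some d else some b : Option Nat).toList ++ List.filterMap pvBMatch xs).min? = _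
        rw [hm]
        simp only [Option.toList_some, List.cons_append, List.nil_append, List.singleton_append]
        rw [List.min?_cons', List.min?_cons', List.foldl_cons]

-- ===== VERDICT (by name: the statement is the Claim_ definition above) =====
theorem detect_system_prefix_py_spec : Claim_equal_detect_system_prefix_py := by
  intro names _hdom
  unfold Spec_detect_system_prefix_py detect_system_prefix_py detect_system_prefix_py_alt
  have hP : ∀ (dN : Nat) (pfx : String), 1 ≤ dN → dN ≤ 9 →
      pfx.toList = pvFS ++ [Char.ofNat (48+dN)] →
      (condA names pfx = true ↔ dN ∈ names.filterMap pvBMatch) := by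
    intro dN pfx h1 h9 hpl
    rw [condA_iff_gen names dN pfx hpl, List.mem_filterMap]
    constructor
    · rintro ⟨s, hs, hap⟩
      exact ⟨s, hs, (bMatch_some_iff s dN).mpr ⟨h1, h9, hap⟩⟩
    · rintro ⟨s, hs, hb⟩
      exact ⟨s, hs, ((bMatch_some_iff s dN).mp hb).2.2⟩
  rw [foldl_altStep_eq,
      show PySem.List.pyRange 1 10 1 = [(1:Int),2,3,4,5,6,7,8,9] from by decide]
  simp only [Option.toList_none, List.nil_append]
  cases hm : (names.filterMap pvBMatch).min? with
  | none =>
    have hemp : names.filterMap pvBMatch = [] := by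
      cases hl : names.filterMap pvBMatch with
      | nil => rfl
      | cons a l => rw [hl, List.min?_cons'] at hm; simp at hm
    have hF1 : condA names ("filesystem" ++ PySem.Int.toStr (1:Int)) = false := by
      cases hcb : condA names ("filesystem" ++ PySem.Int.toStr (1:Int)) with
      | false => rfl
      | true =>
        have h := (hP 1 _ (by omega) (by omega) (by decide)).mp hcb
        rw [hemp] at h
        exact absurd h (by simp)
    have hF2 : condA names ("filesystem" ++ PySem.Int.toStr (2:Int)) = false := by
      cases hcb : condA names ("filesystem" ++ PySem.Int.toStr (2:Int)) with
      | false => rfl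
      | true =>
        have h := (hP 2 _ (by omega) (by omega) (by decide)).mp hcb
        rw [hemp] at h
        exact absurd h (by simp)
    have hF3 : condA names ("filesystem" ++ PySem.Int.toStr (3:Int)) = false := by
      cases hcb : condA names ("filesystem" ++ PySem.Int.toStr (3:Int)) with
      | false => rfl
      | true =>
        have h := (hP 3 _ (by omega) (by omega) (by decide)).mp hcb
        rw [hemp] at h
        exact absurd h (by simp)
    have hF4 : condA names ("filesystem" ++ PySem.Int.toStr (4:Int)) = false := by
      cases hcb : condA names ("filesystem" ++ PySem.Int.toStr (4:Int)) with
      | false => rfl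
      | true =>
        have h := (hP 4 _ (by omega) (by omega) (by decide)).mp hcb
        rw [hemp] at h
        exact absurd h (by simp)
    have hF5 : condA names ("filesystem" ++ PySem.Int.toStr (5:Int)) = false := by
      cases hcb : condA names ("filesystem" ++ PySem.Int.toStr (5:Int)) with
      | false => rfl
      | true =>
        have h := (hP 5 _ (by omega) (by omega) (by decide)).mp hcb
        rw [hemp] at h
        exact absurd h (by simp)
    have hF6 : condA names ("filesystem" ++ PySem.Int.toStr (6:Int)) = false := by
      cases hcb : condA names ("filesystem" ++ PySem.Int.toStr (6:Int)) with
      | false => rfl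
      | true =>
        have h := (hP 6 _ (by omega) (by omega) (by decide)).mp hcb
        rw [hemp] at h
        exact absurd h (by simp)
    have hF7 : condA names ("filesystem" ++ PySem.Int.toStr (7:Int)) = false := by
      cases hcb : condA names ("filesystem" ++ PySem.Int.toStr (7:Int)) with
      | false => rfl
      | true =>
        have h := (hP 7 _ (by omega) (by omega) (by decide)).mp hcb
        rw [hemp] at h
        exact absurd h (by simp)
    have hF8 : condA names ("filesystem" ++ PySem.Int.toStr (8:Int)) = false := by
      cases hcb : condA names ("filesystem" ++ PySem.Int.toStr (8:Int)) with
      | false => rfl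
      | true =>
        have h := (hP 8 _ (by omega) (by omega) (by decide)).mp hcb
        rw [hemp] at h
        exact absurd h (by simp)
    have hF9 : condA names ("filesystem" ++ PySem.Int.toStr (9:Int)) = false := by
      cases hcb : condA names ("filesystem" ++ PySem.Int.toStr (9:Int)) with
      | false => rfl
      | true =>
        have h := (hP 9 _ (by omega) (by omega) (by decide)).mp hcb
        rw [hemp] at h
        exact absurd h (by simp)
    simp only [detectLoopA, hF1, hF2, hF3, hF4, hF5, hF6, hF7, hF8, hF9,
      Bool.false_eq_true, if_false]
    decide
  | some m =>
    obtain ⟨hmem, hle⟩ : m ∈ names.filterMap pvBMatch ∧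
        ∀ b ∈ names.filterMap pvBMatch, m ≤ b := by
      rw [List.min?_eq_some_iff] at hm
      exact hm
    have hbounds : 1 ≤ m ∧ m ≤ 9 := by
      obtain ⟨s, hs, hb⟩ := List.mem_filterMap.mp hmem
      have h := (bMatch_some_iff s m).mp hb
      exact ⟨h.1, h.2.1⟩
    obtain ⟨hm1, hm9⟩ := hbounds
    interval_cases m
    -- m = 1
    · have hT : condA names ("filesystem" ++ PySem.Int.toStr (1:Int)) = true :=
        (hP 1 _ (by omega) (by omega) (by decide)).mpr hmem
      simp only [detectLoopA, hT, Bool.false_eq_true, if_false, if_true]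
      decide
    -- m = 2
    · have hT : condA names ("filesystem" ++ PySem.Int.toStr (2:Int)) = true :=
        (hP 2 _ (by omega) (by omega) (by decide)).mpr hmem
      have hF1 : condA names ("filesystem" ++ PySem.Int.toStr (1:Int)) = false := by
        cases hcb : condA names ("filesystem" ++ PySem.Int.toStr (1:Int)) with
        | false => rfl
        | true =>
          exact absurd (hle 1 ((hP 1 _ (by omega) (by omega) (by decide)).mp hcb)) (by omega)
      simp only [detectLoopA, hF1, hT, Bool.false_eq_true, if_false, if_true]
      decide
    -- m = 3
    · have hT : condA names ("filesystem" ++ PySem.Int.toStr (3:Int)) = true :=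
        (hP 3 _ (by omega) (by omega) (by decide)).mpr hmem
      have hF1 : condA names ("filesystem" ++ PySem.Int.toStr (1:Int)) = false := by
        cases hcb : condA names ("filesystem" ++ PySem.Int.toStr (1:Int)) with
        | false => rfl
        | true =>
          exact absurd (hle 1 ((hP 1 _ (by omega) (by omega) (by decide)).mp hcb)) (by omega)
      have hF2 : condA names ("filesystem" ++ PySem.Int.toStr (2:Int)) = false := by
        cases hcb : condA names ("filesystem" ++ PySem.Int.toStr (2:Int)) with
        | false => rfl
        | true =>
          exact absurd (hle 2 ((hP 2 _ (by omega) (by omega) (by decide)).mp hcb)) (by omega)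
      simp only [detectLoopA, hF1, hF2, hT, Bool.false_eq_true, if_false, if_true]
      decide
    -- m = 4
    · have hT : condA names ("filesystem" ++ PySem.Int.toStr (4:Int)) = true :=
        (hP 4 _ (by omega) (by omega) (by decide)).mpr hmem
      have hF1 : condA names ("filesystem" ++ PySem.Int.toStr (1:Int)) = false := by
        cases hcb : condA names ("filesystem" ++ PySem.Int.toStr (1:Int)) with
        | false => rfl
        | true =>
          exact absurd (hle 1 ((hP 1 _ (by omega) (by omega) (by decide)).mp hcb)) (by omega)
      have hF2 : condA names ("filesystem" ++ PySem.Int.toStr (2:Int)) = false := by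
        cases hcb : condA names ("filesystem" ++ PySem.Int.toStr (2:Int)) with
        | false => rfl
        | true =>
          exact absurd (hle 2 ((hP 2 _ (by omega) (by omega) (by decide)).mp hcb)) (by omega)
      have hF3 : condA names ("filesystem" ++ PySem.Int.toStr (3:Int)) = false := by
        cases hcb : condA names ("filesystem" ++ PySem.Int.toStr (3:Int)) with
        | false => rfl
        | true =>
          exact absurd (hle 3 ((hP 3 _ (by omega) (by omega) (by decide)).mp hcb)) (by omega)
      simp only [detectLoopA, hF1, hF2, hF3, hT, Bool.false_eq_true, if_false, if_true]
      decide
    -- m = 5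
    · have hT : condA names ("filesystem" ++ PySem.Int.toStr (5:Int)) = true :=
        (hP 5 _ (by omega) (by omega) (by decide)).mpr hmem
      have hF1 : condA names ("filesystem" ++ PySem.Int.toStr (1:Int)) = false := by
        cases hcb : condA names ("filesystem" ++ PySem.Int.toStr (1:Int)) with
        | false => rfl
        | true =>
          exact absurd (hle 1 ((hP 1 _ (by omega) (by omega) (by decide)).mp hcb)) (by omega)
      have hF2 : condA names ("filesystem" ++ PySem.Int.toStr (2:Int)) = false := by
        cases hcb : condA names ("filesystem" ++ PySem.Int.toStr (2:Int)) with
        | false => rfl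
        | true =>
          exact absurd (hle 2 ((hP 2 _ (by omega) (by omega) (by decide)).mp hcb)) (by omega)
      have hF3 : condA names ("filesystem" ++ PySem.Int.toStr (3:Int)) = false := by
        cases hcb : condA names ("filesystem" ++ PySem.Int.toStr (3:Int)) with
        | false => rfl
        | true =>
          exact absurd (hle 3 ((hP 3 _ (by omega) (by omega) (by decide)).mp hcb)) (by omega)
      have hF4 : condA names ("filesystem" ++ PySem.Int.toStr (4:Int)) = false := by
        cases hcb : condA names ("filesystem" ++ PySem.Int.toStr (4:Int)) with
        | false => rfl
        | true =>
          exact absurd (hle 4 ((hP 4 _ (by omega) (by omega) (by decide)).mp hcb)) (by omega)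
      simp only [detectLoopA, hF1, hF2, hF3, hF4, hT, Bool.false_eq_true, if_false, if_true]
      decide
    -- m = 6
    · have hT : condA names ("filesystem" ++ PySem.Int.toStr (6:Int)) = true :=
        (hP 6 _ (by omega) (by omega) (by decide)).mpr hmem
      have hF1 : condA names ("filesystem" ++ PySem.Int.toStr (1:Int)) = false := by
        cases hcb : condA names ("filesystem" ++ PySem.Int.toStr (1:Int)) with
        | false => rfl
        | true =>
          exact absurd (hle 1 ((hP 1 _ (by omega) (by omega) (by decide)).mp hcb)) (by omega)
      have hF2 : condA names ("filesystem" ++ PySem.Int.toStr (2:Int)) = false := by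
        cases hcb : condA names ("filesystem" ++ PySem.Int.toStr (2:Int)) with
        | false => rfl
        | true =>
          exact absurd (hle 2 ((hP 2 _ (by omega) (by omega) (by decide)).mp hcb)) (by omega)
      have hF3 : condA names ("filesystem" ++ PySem.Int.toStr (3:Int)) = false := by
        cases hcb : condA names ("filesystem" ++ PySem.Int.toStr (3:Int)) with
        | false => rfl
        | true =>
          exact absurd (hle 3 ((hP 3 _ (by omega) (by omega) (by decide)).mp hcb)) (by omega)
      have hF4 : condA names ("filesystem" ++ PySem.Int.toStr (4:Int)) = false := by
        cases hcb : condA names ("filesystem" ++ PySem.Int.toStr (4:Int)) with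
        | false => rfl
        | true =>
          exact absurd (hle 4 ((hP 4 _ (by omega) (by omega) (by decide)).mp hcb)) (by omega)
      have hF5 : condA names ("filesystem" ++ PySem.Int.toStr (5:Int)) = false := by
        cases hcb : condA names ("filesystem" ++ PySem.Int.toStr (5:Int)) with
        | false => rfl
        | true =>
          exact absurd (hle 5 ((hP 5 _ (by omega) (by omega) (by decide)).mp hcb)) (by omega)
      simp only [detectLoopA, hF1, hF2, hF3, hF4, hF5, hT, Bool.false_eq_true, if_false, if_true]
      decide
    -- m = 7
    · have hT : condA names ("filesystem" ++ PySem.Int.toStr (7:Int)) = true :=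
        (hP 7 _ (by omega) (by omega) (by decide)).mpr hmem
      have hF1 : condA names ("filesystem" ++ PySem.Int.toStr (1:Int)) = false := by
        cases hcb : condA names ("filesystem" ++ PySem.Int.toStr (1:Int)) with
        | false => rfl
        | true =>
          exact absurd (hle 1 ((hP 1 _ (by omega) (by omega) (by decide)).mp hcb)) (by omega)
      have hF2 : condA names ("filesystem" ++ PySem.Int.toStr (2:Int)) = false := by
        cases hcb : condA names ("filesystem" ++ PySem.Int.toStr (2:Int)) with
        | false => rfl
        | true =>
          exact absurd (hle 2 ((hP 2 _ (by omega) (by omega) (by decide)).mp hcb)) (by omega)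
      have hF3 : condA names ("filesystem" ++ PySem.Int.toStr (3:Int)) = false := by
        cases hcb : condA names ("filesystem" ++ PySem.Int.toStr (3:Int)) with
        | false => rfl
        | true =>
          exact absurd (hle 3 ((hP 3 _ (by omega) (by omega) (by decide)).mp hcb)) (by omega)
      have hF4 : condA names ("filesystem" ++ PySem.Int.toStr (4:Int)) = false := by
        cases hcb : condA names ("filesystem" ++ PySem.Int.toStr (4:Int)) with
        | false => rfl
        | true =>
          exact absurd (hle 4 ((hP 4 _ (by omega) (by omega) (by decide)).mp hcb)) (by omega)
      have hF5 : condA names ("filesystem" ++ PySem.Int.toStr (5:Int)) = false := by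
        cases hcb : condA names ("filesystem" ++ PySem.Int.toStr (5:Int)) with
        | false => rfl
        | true =>
          exact absurd (hle 5 ((hP 5 _ (by omega) (by omega) (by decide)).mp hcb)) (by omega)
      have hF6 : condA names ("filesystem" ++ PySem.Int.toStr (6:Int)) = false := by
        cases hcb : condA names ("filesystem" ++ PySem.Int.toStr (6:Int)) with
        | false => rfl
        | true =>
          exact absurd (hle 6 ((hP 6 _ (by omega) (by omega) (by decide)).mp hcb)) (by omega)
      simp only [detectLoopA, hF1, hF2, hF3, hF4, hF5, hF6, hT, Bool.false_eq_true, if_false, if_true]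
      decide
    -- m = 8
    · have hT : condA names ("filesystem" ++ PySem.Int.toStr (8:Int)) = true :=
        (hP 8 _ (by omega) (by omega) (by decide)).mpr hmem
      have hF1 : condA names ("filesystem" ++ PySem.Int.toStr (1:Int)) = false := by
        cases hcb : condA names ("filesystem" ++ PySem.Int.toStr (1:Int)) with
        | false => rfl
        | true =>
          exact absurd (hle 1 ((hP 1 _ (by omega) (by omega) (by decide)).mp hcb)) (by omega)
      have hF2 : condA names ("filesystem" ++ PySem.Int.toStr (2:Int)) = false := by
        cases hcb : condA names ("filesystem" ++ PySem.Int.toStr (2:Int)) with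
        | false => rfl
        | true =>
          exact absurd (hle 2 ((hP 2 _ (by omega) (by omega) (by decide)).mp hcb)) (by omega)
      have hF3 : condA names ("filesystem" ++ PySem.Int.toStr (3:Int)) = false := by
        cases hcb : condA names ("filesystem" ++ PySem.Int.toStr (3:Int)) with
        | false => rfl
        | true =>
          exact absurd (hle 3 ((hP 3 _ (by omega) (by omega) (by decide)).mp hcb)) (by omega)
      have hF4 : condA names ("filesystem" ++ PySem.Int.toStr (4:Int)) = false := by
        cases hcb : condA names ("filesystem" ++ PySem.Int.toStr (4:Int)) with
        | false => rfl
        | true =>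
          exact absurd (hle 4 ((hP 4 _ (by omega) (by omega) (by decide)).mp hcb)) (by omega)
      have hF5 : condA names ("filesystem" ++ PySem.Int.toStr (5:Int)) = false := by
        cases hcb : condA names ("filesystem" ++ PySem.Int.toStr (5:Int)) with
        | false => rfl
        | true =>
          exact absurd (hle 5 ((hP 5 _ (by omega) (by omega) (by decide)).mp hcb)) (by omega)
      have hF6 : condA names ("filesystem" ++ PySem.Int.toStr (6:Int)) = false := by
        cases hcb : condA names ("filesystem" ++ PySem.Int.toStr (6:Int)) with
        | false => rfl
        | true =>
          exact absurd (hle 6 ((hP 6 _ (by omega) (by omega) (by decide)).mp hcb)) (by omega)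
      have hF7 : condA names ("filesystem" ++ PySem.Int.toStr (7:Int)) = false := by
        cases hcb : condA names ("filesystem" ++ PySem.Int.toStr (7:Int)) with
        | false => rfl
        | true =>
          exact absurd (hle 7 ((hP 7 _ (by omega) (by omega) (by decide)).mp hcb)) (by omega)
      simp only [detectLoopA, hF1, hF2, hF3, hF4, hF5, hF6, hF7, hT, Bool.false_eq_true, if_false, if_true]
      decide
    -- m = 9
    · have hT : condA names ("filesystem" ++ PySem.Int.toStr (9:Int)) = true :=
        (hP 9 _ (by omega) (by omega) (by decide)).mpr hmem
      have hF1 : condA names ("filesystem" ++ PySem.Int.toStr (1:Int)) = false := by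
        cases hcb : condA names ("filesystem" ++ PySem.Int.toStr (1:Int)) with
        | false => rfl
        | true =>
          exact absurd (hle 1 ((hP 1 _ (by omega) (by omega) (by decide)).mp hcb)) (by omega)
      have hF2 : condA names ("filesystem" ++ PySem.Int.toStr (2:Int)) = false := by
        cases hcb : condA names ("filesystem" ++ PySem.Int.toStr (2:Int)) with
        | false => rfl
        | true =>
          exact absurd (hle 2 ((hP 2 _ (by omega) (by omega) (by decide)).mp hcb)) (by omega)
      have hF3 : condA names ("filesystem" ++ PySem.Int.toStr (3:Int)) = false := by
        cases hcb : condA names ("filesystem" ++ PySem.Int.toStr (3:Int)) with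
        | false => rfl
        | true =>
          exact absurd (hle 3 ((hP 3 _ (by omega) (by omega) (by decide)).mp hcb)) (by omega)
      have hF4 : condA names ("filesystem" ++ PySem.Int.toStr (4:Int)) = false := by
        cases hcb : condA names ("filesystem" ++ PySem.Int.toStr (4:Int)) with
        | false => rfl
        | true =>
          exact absurd (hle 4 ((hP 4 _ (by omega) (by omega) (by decide)).mp hcb)) (by omega)
      have hF5 : condA names ("filesystem" ++ PySem.Int.toStr (5:Int)) = false := by
        cases hcb : condA names ("filesystem" ++ PySem.Int.toStr (5:Int)) with
        | false => rfl
        | true =>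
          exact absurd (hle 5 ((hP 5 _ (by omega) (by omega) (by decide)).mp hcb)) (by omega)
      have hF6 : condA names ("filesystem" ++ PySem.Int.toStr (6:Int)) = false := by
        cases hcb : condA names ("filesystem" ++ PySem.Int.toStr (6:Int)) with
        | false => rfl
        | true =>
          exact absurd (hle 6 ((hP 6 _ (by omega) (by omega) (by decide)).mp hcb)) (by omega)
      have hF7 : condA names ("filesystem" ++ PySem.Int.toStr (7:Int)) = false := by
        cases hcb : condA names ("filesystem" ++ PySem.Int.toStr (7:Int)) with
        | false => rfl
        | true =>
          exact absurd (hle 7 ((hP 7 _ (by omega) (by omega) (by decide)).mp hcb)) (by omega)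
      have hF8 : condA names ("filesystem" ++ PySem.Int.toStr (8:Int)) = false := by
        cases hcb : condA names ("filesystem" ++ PySem.Int.toStr (8:Int)) with
        | false => rfl
        | true =>
          exact absurd (hle 8 ((hP 8 _ (by omega) (by omega) (by decide)).mp hcb)) (by omega)
      simp only [detectLoopA, hF1, hF2, hF3, hF4, hF5, hF6, hF7, hF8, hT, Bool.false_eq_true, if_false, if_true]
      decide
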